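-- pv_equiv track=rewrite | github.com/Eeap/Algorithm | 프로그래머스/PCCP 기출/problem1.py | solution
-- ===== SOURCE A (Python) =====
-- def solution(bandage, health, attacks):
--     answer = 0
--     begin = 0
--     end = 0
--     hp = health
--     for t, attack in attacks:
--         end = t
--         total = end - begin - 1
--         cont = 0
--         for cnt in range(1, total + 1):
--             cont += 1
--             hp += bandage[1]
--             if cont == bandage[0]:
--                 hp += bandage[2]
--                 cont = 0
--
--             if hp >= health:
--                 hp = health
--                 cont = 0
--         begin = t
--         hp -= attack
--         if hp <= 0:
--             return -1
--     return hp
-- ===== SOURCE B (Python) =====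
-- def solution(bandage, health, attacks):
--     period, x, y = bandage[0], bandage[1], bandage[2]
--
--     def first_cap(hp, limit):
--         # smallest j in 1..limit with hp + j*x >= health; 0 if the run never caps
--         if limit <= 0:
--             return 0
--         if hp + x >= health:
--             return 1
--         if x <= 0:
--             return 0
--         j = -((hp - health) // x)  # = ceil((health - hp) / x)
--         return j if j <= limit else 0
--
--     def heal(hp, n):
--         # n healing ticks starting with a fresh bonus counter, jumping run by run
--         while n > 0:
--             if hp >= health and x >= 0 and period != 1:
--                 return health  # full and never dipping: every tick re-caps
--             if 1 <= period <= n: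
--                 j = first_cap(hp, period - 1)
--                 if j:
--                     hp = health
--                     n -= j
--                 else:
--                     raw = hp + period * x + y  # survive to the bonus tick
--                     hp = health if raw >= health else raw
--                     n -= period
--             else:
--                 j = first_cap(hp, n)  # the bonus tick is out of reach
--                 if not j:
--                     return hp + n * x
--                 hp = health
--                 n -= j
--         return hp
--
--     hp = health
--     prev = 0
--     for t, attack in attacks:
--         hp = heal(hp, t - prev - 1)
--         prev = t
--         hp -= attack
--         if hp <= 0:
--             return -1
--     return hp
-- ===== Notes on version B (the rewrite author's own statement) =====
-- stated objective: alternative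
-- what changed: B replaces A's second-by-second simulation with run-jumping: per interval it advances over whole cap-free affine runs at once (the first capping tick found by one ceiling division), handles each bonus period and each cap as a single O(1) step, and short-circuits the full-HP steady state, instead of iterating every tick with a counter.
-- outside the precondition, e.g. on solution([], 5, [(1, 1)]): A returns 4, B raises IndexError; on solution([2, 1], 7, [(1, 2), (2, 3)]): A returns 2, B raises IndexError
import Mathlib
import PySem

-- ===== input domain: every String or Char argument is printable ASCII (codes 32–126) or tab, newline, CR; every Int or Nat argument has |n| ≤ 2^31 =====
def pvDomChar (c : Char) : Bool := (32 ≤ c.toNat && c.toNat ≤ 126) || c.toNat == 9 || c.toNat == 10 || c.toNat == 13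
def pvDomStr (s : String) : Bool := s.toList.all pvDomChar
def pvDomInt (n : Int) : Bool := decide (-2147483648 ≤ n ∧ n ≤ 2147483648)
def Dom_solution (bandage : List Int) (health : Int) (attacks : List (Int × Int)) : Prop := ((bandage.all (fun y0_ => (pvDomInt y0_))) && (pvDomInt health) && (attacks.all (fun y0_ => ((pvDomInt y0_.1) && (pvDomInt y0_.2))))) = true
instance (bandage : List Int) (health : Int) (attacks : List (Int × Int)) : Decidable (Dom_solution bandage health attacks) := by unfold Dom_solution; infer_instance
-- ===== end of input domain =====

-- B replaces A's second-by-second healing simulation with run-jumping (whole cap-free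
-- affine runs, bonus periods and cap events handled as single arithmetic steps).

-- ===== PORT A =====
-- the body of A's inner `for cnt in range(1, total+1)` loop, acting on the state (hp, cont)
def pvTickA (b0 b1 b2 health : Int) (s : Int × Int) : Int × Int :=
  let cont := s.2 + 1
  let hp := s.1 + b1
  let s' := if cont = b0 then (hp + b2, (0 : Int)) else (hp, cont)
  if health ≤ s'.1 then (health, 0) else s'

-- A's outer loop over attacks, with its early `return -1`
def pvGoA (bandage : List Int) (health : Int) : List (Int × Int) → Int → Int → Int
  | [], _, hp => hp
  | (t, attack) :: rest, begin_, hp =>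
    let end_ := t
    let total := end_ - begin_ - 1
    -- bandage[0]/[1]/[2]: Python raises IndexError when bandage has < 3 items and the
    -- inner loop runs; Pre_solution excludes that, so the pyGetD default 0 is unreachable
    let b0 := PySem.List.pyGetD bandage 0 0
    let b1 := PySem.List.pyGetD bandage 1 0
    let b2 := PySem.List.pyGetD bandage 2 0
    let s := (PySem.List.pyRange 1 (total + 1) 1).foldl
      (fun s _ => pvTickA b0 b1 b2 health s) (hp, 0)
    let hp1 := s.1 - attack
    if hp1 ≤ 0 then -1 else pvGoA bandage health rest t hp1

def solution (bandage : List Int) (health : Int) (attacks : List (Int × Int)) : Int :=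
  pvGoA bandage health attacks 0 health

-- ===== PORT B =====
-- B's first_cap: smallest j in 1..limit with hp + j*x >= health; 0 if the run never caps
def pvFirstCap (health x hp limit : Int) : Int :=
  if limit ≤ 0 then 0
  else if health ≤ hp + x then 1
  else if x ≤ 0 then 0
  else if -(PySem.Int.floordiv (hp - health) x) ≤ limit then
    -(PySem.Int.floordiv (hp - health) x)
  else 0

-- first_cap is 0 with the whole run strictly below health, or the FIRST capping tick in 1..limit
theorem pvFirstCap_main (health x hp limit : Int) :
    (pvFirstCap health x hp limit = 0 ∧
      ∀ i : Int, 1 ≤ i → i ≤ limit → hp + i * x < health) ∨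
    (1 ≤ pvFirstCap health x hp limit ∧ pvFirstCap health x hp limit ≤ limit ∧
      health ≤ hp + pvFirstCap health x hp limit * x ∧
      ∀ i : Int, 1 ≤ i → i < pvFirstCap health x hp limit → hp + i * x < health) := by
  unfold pvFirstCap
  split_ifs with h1 h2 h3 h4
  · left
    exact ⟨rfl, by omega⟩
  · right
    refine ⟨le_rfl, by omega, by omega, by omega⟩
  · left
    refine ⟨rfl, ?_⟩
    intro i hi1 hi2
    have hmono : (i - 1) * x ≤ 0 := mul_nonpos_of_nonneg_of_nonpos (by omega) h3
    have hexp : (i - 1) * x = i * x - x := by ring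
    omega
  · right
    rw [PySem.Int.floordiv_eq_ediv_of_pos (by omega)] at h4 ⊢
    have hq := Int.mul_ediv_add_emod (hp - health) x
    have hr0 : 0 ≤ (hp - health) % x := Int.emod_nonneg _ (by omega)
    have hrx : (hp - health) % x < x := Int.emod_lt_of_pos _ (by omega)
    -- hp + x < health, so the quotient is at most -1
    have hq1 : x * ((hp - health) / x) < -x := by omega
    have hqneg : (hp - health) / x + 1 ≤ 0 := by
      by_contra hc
      have h0 : (0 : Int) ≤ (hp - health) / x + 1 := by omega
      have := mul_nonneg (by omega : (0 : Int) ≤ x) h0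
      nlinarith
    refine ⟨by omega, h4, ?_, ?_⟩
    · have hexp : -((hp - health) / x) * x = -(x * ((hp - health) / x)) := by ring
      omega
    · intro i hi1 hi2
      have hle : i * x ≤ (-((hp - health) / x) - 1) * x :=
        mul_le_mul_of_nonneg_right (by omega) (by omega)
      have hexp : (-((hp - health) / x) - 1) * x = -(x * ((hp - health) / x)) - x := by
        ring
      omega
  · left
    refine ⟨rfl, ?_⟩
    intro i hi1 hi2
    rw [PySem.Int.floordiv_eq_ediv_of_pos (by omega)] at h4
    have hq := Int.mul_ediv_add_emod (hp - health) x
    have hr0 : 0 ≤ (hp - health) % x := Int.emod_nonneg _ (by omega)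
    have hrx : (hp - health) % x < x := Int.emod_lt_of_pos _ (by omega)
    have hle : i * x ≤ (-((hp - health) / x) - 1) * x :=
      mul_le_mul_of_nonneg_right (by omega) (by omega)
    have hexp : (-((hp - health) / x) - 1) * x = -(x * ((hp - health) / x)) - x := by
      ring
    omega

-- needed by pvHeal's termination: a nonzero first_cap lies in 1..limit
theorem pvFirstCap_nonzero_bounds (health x hp limit : Int)
    (h : pvFirstCap health x hp limit ≠ 0) :
    1 ≤ pvFirstCap health x hp limit ∧ pvFirstCap health x hp limit ≤ limit := by
  rcases pvFirstCap_main health x hp limit with ⟨h0, _⟩ | ⟨ha, hb, _, _⟩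
  · exact absurd h0 h
  · exact ⟨ha, hb⟩

-- B's heal: jump run by run instead of tick by tick
def pvHeal (p x y health hp n : Int) : Int :=
  if hn : 0 < n then
    if health ≤ hp ∧ 0 ≤ x ∧ p ≠ 1 then health
    else if hpn : 1 ≤ p ∧ p ≤ n then
      if hj : pvFirstCap health x hp (p - 1) ≠ 0 then
        pvHeal p x y health health (n - pvFirstCap health x hp (p - 1))
      else
        let raw := hp + p * x + y
        pvHeal p x y health (if health ≤ raw then health else raw) (n - p)
    else
      if hj : ¬ pvFirstCap health x hp n ≠ 0 then hp + n * x
      else pvHeal p x y health health (n - pvFirstCap health x hp n)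
  else hp
termination_by n.toNat
decreasing_by
  · have := pvFirstCap_nonzero_bounds health x hp (p - 1) hj
    omega
  · omega
  · have := pvFirstCap_nonzero_bounds health x hp n (by
      intro h0; exact hj (by simp [h0]))
    omega

def pvGoB (p x y health : Int) : List (Int × Int) → Int → Int → Int
  | [], _, hp => hp
  | (t, attack) :: rest, prev, hp =>
    let hp1 := pvHeal p x y health hp (t - prev - 1)
    let hp2 := hp1 - attack
    if hp2 ≤ 0 then -1 else pvGoB p x y health rest t hp2

def solution_alt (bandage : List Int) (health : Int) (attacks : List (Int × Int)) : Int :=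
  -- bandage[0]/[1]/[2]: Python B raises IndexError when bandage has < 3 items;
  -- Pre_solution excludes that, so the pyGetD default 0 is unreachable
  let p := PySem.List.pyGetD bandage 0 0
  let x := PySem.List.pyGetD bandage 1 0
  let y := PySem.List.pyGetD bandage 2 0
  pvGoB p x y health attacks 0 health

-- ===== PRECONDITION & SPEC =====
-- Pre_ requires bandage to have its three fields [period, heal, bonus]: with fewer, Python A
-- raises IndexError as soon as a healing tick runs, and Python B raises IndexError upfront
-- (on the rare shorter inputs that A survives — attacks leaving no healing tick — B still raises).
def Pre_solution (bandage : List Int) (health : Int) (attacks : List (Int × Int)) : Prop :=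
  3 ≤ bandage.length
instance (bandage : List Int) (health : Int) (attacks : List (Int × Int)) : Decidable (Pre_solution bandage health attacks) := by unfold Pre_solution; infer_instance

def pvWitness_solution : List Int × Int × (List (Int × Int)) := ([1, 1, 1], 10, [(3, 4)])

def Spec_solution (bandage : List Int) (health : Int) (attacks : List (Int × Int)) (out : Int) : Prop := out = solution_alt bandage health attacks
instance (bandage : List Int) (health : Int) (attacks : List (Int × Int)) (out : Int) : Decidable (Spec_solution bandage health attacks out) := by unfold Spec_solution; infer_instance

-- ===== CLAIM (what is proved, stated in full; the proofs are below) =====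
def Claim_equal_solution : Prop := ∀ (bandage : List Int) (health : Int) (attacks : List (Int × Int)), Dom_solution bandage health attacks → Pre_solution bandage health attacks → Spec_solution bandage health attacks (solution bandage health attacks)

-- ===== LEMMAS AND PROOFS =====

-- a fold that ignores the elements is an iterate of the step
theorem pv_foldl_const {α β : Type} (f : β → β) :
    ∀ (l : List α) (init : β), l.foldl (fun s _ => f s) init = f^[l.length] init := by
  intro l
  induction l with
  | nil => intro init; rfl
  | cons x xs ih =>
      intro init
      simp [List.foldl_cons, ih, Function.iterate_succ_apply]

-- first_cap = 0 means the whole run stays strictly below health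
theorem pvFirstCap_zero (health x hp limit : Int)
    (h : pvFirstCap health x hp limit = 0) :
    ∀ i : Int, 1 ≤ i → i ≤ limit → hp + i * x < health := by
  rcases pvFirstCap_main health x hp limit with ⟨_, hall⟩ | ⟨ha, _, _, _⟩
  · exact hall
  · omega

-- a nonzero first_cap is the FIRST capping tick of the run
theorem pvFirstCap_spec (health x hp limit : Int)
    (h : pvFirstCap health x hp limit ≠ 0) :
    health ≤ hp + pvFirstCap health x hp limit * x ∧
      ∀ i : Int, 1 ≤ i → i < pvFirstCap health x hp limit → hp + i * x < health := by
  rcases pvFirstCap_main health x hp limit with ⟨h0, _⟩ | ⟨_, _, hc, hd⟩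
  · exact absurd h0 h
  · exact ⟨hc, hd⟩

-- one tick of A without the bonus firing
theorem pv_tick_plain (p x y health hp c : Int) (h : c + 1 ≠ p) :
    pvTickA p x y health (hp, c) =
      if health ≤ hp + x then (health, 0) else (hp + x, c + 1) := by
  simp [pvTickA, h]

-- one tick of A with the bonus firing
theorem pv_tick_bonus (p x y health hp c : Int) (h : c + 1 = p) :
    pvTickA p x y health (hp, c) =
      if health ≤ hp + x + y then (health, 0) else (hp + x + y, 0) := by
  simp [pvTickA, h]

-- a cap-free, bonus-free run of r ticks is affine
theorem pv_run (p x y health hp : Int) : ∀ r : Nat,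
    (∀ i : Int, 1 ≤ i → i ≤ r → hp + i * x < health ∧ i ≠ p) →
    (pvTickA p x y health)^[r] (hp, 0) = (hp + r * x, (r : Int)) := by
  intro r
  induction r with
  | zero => simp
  | succ r ih =>
      intro hterm
      rw [Function.iterate_succ_apply', ih (fun i h1 h2 => hterm i h1 (by push_cast; omega))]
      obtain ⟨hcap, hne⟩ := hterm ((r : Int) + 1) (by omega) (by push_cast; omega)
      have hexp : hp + ((r : Int) + 1) * x = hp + (r : Int) * x + x := by ring
      rw [pv_tick_plain p x y health _ _ hne, if_neg (by omega)]
      push_cast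
      rw [hexp]

-- the first capping tick ends the run in state (health, 0)
theorem pv_cap (p x y health hp j : Int) (hj1 : 1 ≤ j) (hjp : j ≠ p)
    (hcap : health ≤ hp + j * x)
    (hmin : ∀ i : Int, 1 ≤ i → i < j → hp + i * x < health ∧ i ≠ p) :
    (pvTickA p x y health)^[j.toNat] (hp, 0) = (health, 0) := by
  have hsplit : j.toNat = (j - 1).toNat + 1 := by omega
  rw [hsplit, Function.iterate_succ_apply',
    pv_run p x y health hp (j - 1).toNat
      (fun i h1 h2 => hmin i h1 (by omega))]
  have hc : ((j - 1).toNat : Int) = j - 1 := by omega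
  have hexp : hp + (j - 1) * x + x = hp + j * x := by ring
  rw [hc, pv_tick_plain p x y health _ _ (by omega), if_pos (by omega)]

-- surviving to the bonus tick: p ticks collapse to one arithmetic step
theorem pv_bonus_step (p x y health hp : Int) (hp1 : 1 ≤ p)
    (hnc : ∀ i : Int, 1 ≤ i → i ≤ p - 1 → hp + i * x < health) :
    (pvTickA p x y health)^[p.toNat] (hp, 0) =
      if health ≤ hp + p * x + y then (health, 0) else (hp + p * x + y, 0) := by
  have hsplit : p.toNat = (p - 1).toNat + 1 := by omega
  rw [hsplit, Function.iterate_succ_apply',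
    pv_run p x y health hp (p - 1).toNat
      (fun i h1 h2 => ⟨(hnc i h1 (by omega)), by omega⟩)]
  have hc : ((p - 1).toNat : Int) = p - 1 := by omega
  rw [hc, pv_tick_bonus p x y health _ _ (by omega)]
  have : hp + (p - 1) * x + x + y = hp + p * x + y := by ring
  rw [this]

-- at or above full health with nonnegative healing and no instant bonus, A stays at health
theorem pv_steady (p x y health hp : Int) (hh : health ≤ hp) (hx : 0 ≤ x)
    (hp1 : p ≠ 1) : ∀ m : Nat, 1 ≤ m →
    (pvTickA p x y health)^[m] (hp, 0) = (health, 0) := by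
  intro m
  induction m with
  | zero => omega
  | succ m ih =>
      intro _
      rw [Function.iterate_succ_apply']
      by_cases hm : 1 ≤ m
      · rw [ih hm, pv_tick_plain p x y health _ _ (by omega), if_pos (by omega)]
      · have hm0 : m = 0 := by omega
        subst hm0
        simp only [Function.iterate_zero, id_eq]
        rw [pv_tick_plain p x y health hp 0 (by omega), if_pos (by omega)]

-- the heart: B's run-jumping heal equals A's tick-by-tick interval simulation
theorem pv_heal_eq (p x y health : Int) : ∀ (k : Nat) (n hp : Int), n.toNat ≤ k →
    pvHeal p x y health hp n = ((pvTickA p x y health)^[n.toNat] (hp, 0)).1 := by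
  intro k
  induction k with
  | zero =>
      intro n hp hk
      rw [pvHeal, dif_neg (by omega : ¬ 0 < n)]
      have : n.toNat = 0 := by omega
      rw [this]
      rfl
  | succ k ih =>
      intro n hp hk
      by_cases hn : 0 < n
      · rw [pvHeal, dif_pos hn]
        by_cases hst : health ≤ hp ∧ 0 ≤ x ∧ p ≠ 1
        · rw [if_pos hst,
            pv_steady p x y health hp hst.1 hst.2.1 hst.2.2 n.toNat (by omega)]
        · rw [if_neg hst]
          by_cases hpn : 1 ≤ p ∧ p ≤ n
          · rw [dif_pos hpn]
            by_cases hj : pvFirstCap health x hp (p - 1) ≠ 0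
            · rw [dif_pos hj]
              obtain ⟨hjlo, hjhi⟩ := pvFirstCap_nonzero_bounds health x hp (p - 1) hj
              obtain ⟨hjcap, hjmin⟩ := pvFirstCap_spec health x hp (p - 1) hj
              set j := pvFirstCap health x hp (p - 1) with hjdef
              have hsplit : n.toNat = (n - j).toNat + j.toNat := by omega
              rw [hsplit, Function.iterate_add_apply,
                pv_cap p x y health hp j hjlo (by omega) hjcap
                  (fun i h1 h2 => ⟨hjmin i h1 h2, by omega⟩),
                ih (n - j) health (by omega)]
            · rw [dif_neg hj]
              have hnc := pvFirstCap_zero health x hp (p - 1) (by omega)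
              have hsplit : n.toNat = (n - p).toNat + p.toNat := by omega
              rw [hsplit, Function.iterate_add_apply,
                pv_bonus_step p x y health hp hpn.1 hnc]
              have hpair : (if health ≤ hp + p * x + y then ((health : Int), (0 : Int))
                  else (hp + p * x + y, 0)) =
                  ((if health ≤ hp + p * x + y then health else hp + p * x + y), 0) := by
                split <;> rfl
              rw [hpair, ih (n - p) _ (by omega)]
          · rw [dif_neg hpn]
            have hip : ∀ i : Int, 1 ≤ i → i ≤ n → i ≠ p := by omega
            by_cases hj : pvFirstCap health x hp n ≠ 0
            · rw [dif_neg (by simpa using hj)]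
              obtain ⟨hjlo, hjhi⟩ := pvFirstCap_nonzero_bounds health x hp n hj
              obtain ⟨hjcap, hjmin⟩ := pvFirstCap_spec health x hp n hj
              set j := pvFirstCap health x hp n with hjdef
              have hsplit : n.toNat = (n - j).toNat + j.toNat := by omega
              rw [hsplit, Function.iterate_add_apply,
                pv_cap p x y health hp j hjlo (hip j hjlo hjhi) hjcap
                  (fun i h1 h2 => ⟨hjmin i h1 h2, hip i h1 (by omega)⟩),
                ih (n - j) health (by omega)]
            · rw [dif_pos (by simpa using hj)]
              have hnc := pvFirstCap_zero health x hp n (by omega)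
              rw [pv_run p x y health hp n.toNat (by
                intro i h1 h2
                have hc : ((n.toNat : Int)) = n := by omega
                exact ⟨hnc i h1 (by omega), hip i h1 (by omega)⟩)]
              have hc : ((n.toNat : Int)) = n := by omega
              rw [hc]
        --
      · rw [pvHeal, dif_neg hn]
        have : n.toNat = 0 := by omega
        rw [this]
        rfl

-- the two outer loops agree for every start state
theorem pv_go_eq (bandage : List Int) (health : Int) :
    ∀ (attacks : List (Int × Int)) (b hp : Int),
      pvGoA bandage health attacks b hp =
        pvGoB (PySem.List.pyGetD bandage 0 0) (PySem.List.pyGetD bandage 1 0)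
          (PySem.List.pyGetD bandage 2 0) health attacks b hp := by
  intro attacks
  induction attacks with
  | nil => intro b hp; rfl
  | cons ta rest ih =>
      obtain ⟨t, attack⟩ := ta
      intro b hp
      unfold pvGoA pvGoB
      dsimp only
      rw [pv_foldl_const, PySem.List.length_pyRange_one]
      have hc : t - b - 1 + 1 - 1 = t - b - 1 := by ring
      rw [hc, ← pv_heal_eq (PySem.List.pyGetD bandage 0 0) (PySem.List.pyGetD bandage 1 0)
        (PySem.List.pyGetD bandage 2 0) health (t - b - 1).toNat (t - b - 1) hp le_rfl]
      split_ifs with h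
      · rfl
      · exact ih t _

-- ===== VERDICT (by name: the statement is the Claim_ definition above) =====
theorem solution_spec : Claim_equal_solution := by
  intro bandage health attacks _ _
  unfold Spec_solution solution solution_alt
  exact pv_go_eq bandage health attacks 0 health
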